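-- pv_equiv track=rewrite | github.com/rohan-dot/Rasa-NLU | bioasq_agentic_local.py | _sb
-- ===== SOURCE A (Python) =====
-- def _sb(texts, mx=5000):
--     b = ""
--     for i, s in enumerate(texts, 1):
--         line = f"[{i}] {s.strip()}\n"
--         if len(b) + len(line) > mx:
--             break
--         b += line
--     return b.strip()
-- ===== SOURCE B (Python) =====
-- def _sb(texts, mx=5000):
--     lines = [f"[{i}] {s.strip()}\n" for i, s in enumerate(texts, 1)]
--     cums = []
--     t = 0
--     for ln in lines:
--         t += len(ln)
--         cums.append(t)
--     cutoff = sum(1 for c in cums if c <= mx)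
--     return "".join(lines[:cutoff]).strip()
-- ===== Notes on version B (the rewrite author's own statement) =====
-- stated objective: alternative
-- what changed: Replaces A's incremental string accumulation with break by precomputing all formatted lines and their prefix-length table, deriving the cutoff as the count of prefix sums within the budget (valid since line lengths are positive, so prefix sums are strictly increasing), then joining a single slice.
import Mathlib
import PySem

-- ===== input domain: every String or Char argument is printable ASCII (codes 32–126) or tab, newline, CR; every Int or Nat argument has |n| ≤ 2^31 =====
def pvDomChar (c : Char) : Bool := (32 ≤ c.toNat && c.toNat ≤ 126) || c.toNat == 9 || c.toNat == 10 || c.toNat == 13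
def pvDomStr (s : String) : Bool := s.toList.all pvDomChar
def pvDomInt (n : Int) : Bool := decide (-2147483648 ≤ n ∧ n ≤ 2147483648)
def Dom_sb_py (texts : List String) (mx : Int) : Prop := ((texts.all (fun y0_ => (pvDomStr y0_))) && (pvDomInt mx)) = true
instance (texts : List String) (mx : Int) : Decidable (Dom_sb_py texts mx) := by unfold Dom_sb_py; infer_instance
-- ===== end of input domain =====

-- B precomputes the formatted lines and their prefix-length table, takes the cutoff as the
-- count of prefix sums within the budget, and joins one slice; alternative decomposition, same cost.


-- ===== PORT A =====
-- f"[{i}] {s.strip()}\n"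
def sbFmt (i : Int) (s : String) : String :=
  "[" ++ PySem.Int.toStr i ++ "] " ++ PySem.Str.strip s ++ "\n"

-- the 'for i, s in enumerate(texts, 1): … break' loop, state = (i, b)
def sbLoopA (mx : Int) : List String → Int → String → String
  | [], _, b => b
  | s :: rest, i, b =>
    let line := sbFmt i s
    if PySem.Str.len b + PySem.Str.len line > mx then b
    else sbLoopA mx rest (i + 1) (b ++ line)

def sb_py (texts : List String) (mx : Int) : String :=
  PySem.Str.strip (sbLoopA mx texts 1 "")

-- ===== PORT B =====
-- lines = [f"[{i}] {s.strip()}\n" for i, s in enumerate(texts, 1)]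
def sbLines (texts : List String) : List String :=
  (PySem.List.enumerate texts 1).map (fun p => sbFmt p.1 p.2)

-- the 't += len(ln); cums.append(t)' loop building the prefix-length table
def sbCums : List String → Int → List Int
  | [], _ => []
  | ln :: rest, t => (t + PySem.Str.len ln) :: sbCums rest (t + PySem.Str.len ln)

def sb_py_alt (texts : List String) (mx : Int) : String :=
  let lines := sbLines texts
  let cums := sbCums lines 0
  let cutoff := cums.countP (fun c => decide (c ≤ mx))   -- sum(1 for c in cums if c <= mx)
  PySem.Str.strip (PySem.Str.join "" (lines.take cutoff))

-- ===== PRECONDITION & SPEC =====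
def Spec_sb_py (texts : List String) (mx : Int) (out : String) : Prop := out = sb_py_alt texts mx
instance (texts : List String) (mx : Int) (out : String) : Decidable (Spec_sb_py texts mx out) := by unfold Spec_sb_py; infer_instance

-- ===== CLAIM (what is proved, stated in full; the proofs are below) =====
def Claim_equal_sb_py : Prop := ∀ (texts : List String) (mx : Int), Dom_sb_py texts mx → Spec_sb_py texts mx (sb_py texts mx)

-- ===== LEMMAS AND PROOFS =====

-- common functional core: the concatenation of lines, stopping before the first that would
-- push the running total t past mx
def sbH (mx : Int) : List String → Int → String
  | [], _ => ""
  | ln :: rest, t =>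
    if t + PySem.Str.len ln > mx then ""
    else ln ++ sbH mx rest (t + PySem.Str.len ln)

-- recursive characterisation of sbLines
def sbLines' : List String → Int → List String
  | [], _ => []
  | s :: rest, i => sbFmt i s :: sbLines' rest (i + 1)

theorem sbLines_eq (texts : List String) : ∀ i, sbLines' texts i = (PySem.List.enumerate texts i).map (fun p => sbFmt p.1 p.2) := by
  induction texts with
  | nil => intro i; simp [sbLines', PySem.List.enumerate]
  | cons s rest ih => intro i; simp [sbLines', PySem.List.enumerate, ih (i + 1)]

theorem sbLen_nonneg (s : String) : 0 ≤ PySem.Str.len s := by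
  rw [PySem.Str.len_eq]; exact Int.natCast_nonneg _

theorem sbFmt_len_pos (i : Int) (s : String) : 1 ≤ PySem.Str.len (sbFmt i s) := by
  unfold sbFmt
  rw [PySem.Str.len_append, PySem.Str.len_append, PySem.Str.len_append, PySem.Str.len_append]
  have h1 : PySem.Str.len "\n" = 1 := by decide
  have h2 := sbLen_nonneg "["
  have h3 := sbLen_nonneg (PySem.Int.toStr i)
  have h4 := sbLen_nonneg "] "
  have h5 := sbLen_nonneg (PySem.Str.strip s)
  omega

theorem sbH_cons (mx : Int) (ln : String) (rest : List String) (t : Int) :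
    sbH mx (ln :: rest) t =
      if t + PySem.Str.len ln > mx then "" else ln ++ sbH mx rest (t + PySem.Str.len ln) := rfl

theorem sbCums_cons (ln : String) (rest : List String) (t : Int) :
    sbCums (ln :: rest) t = (t + PySem.Str.len ln) :: sbCums rest (t + PySem.Str.len ln) := rfl

theorem sbLines'_len_pos (texts : List String) : ∀ i ln, ln ∈ sbLines' texts i → 1 ≤ PySem.Str.len ln := by
  induction texts with
  | nil => intro i ln h; simp [sbLines'] at h
  | cons s rest ih =>
    intro i ln h
    simp only [sbLines', List.mem_cons] at h
    rcases h with h | h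
    · exact h ▸ sbFmt_len_pos i s
    · exact ih (i + 1) ln h

theorem sbCums_gt (lines : List String) : ∀ t, (∀ ln ∈ lines, 1 ≤ PySem.Str.len ln) → ∀ c ∈ sbCums lines t, t < c := by
  induction lines with
  | nil => intro t _ c hc; simp [sbCums] at hc
  | cons ln rest ih =>
    intro t hpos c hc
    have hln : 1 ≤ PySem.Str.len ln := hpos ln (by simp)
    simp only [sbCums, List.mem_cons] at hc
    rcases hc with hc | hc
    · omega
    · have := ih (t + PySem.Str.len ln) (fun x hx => hpos x (by simp [hx])) c hc
      omega

theorem join_empty_cons (a : String) (l : List String) :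
    PySem.Str.join "" (a :: l) = a ++ PySem.Str.join "" l := by
  have h : (PySem.Str.join "" (a :: l)).toList = (a ++ PySem.Str.join "" l).toList := by
    cases l <;> simp [PySem.Str.toList_join, PySem.Chars.join, List.intercalate]
  exact String.toList_inj.mp h

-- B's join-of-slice equals the stop-at-budget concatenation
theorem joinTake_eq_sbH (mx : Int) (lines : List String) :
    ∀ t, (∀ ln ∈ lines, 1 ≤ PySem.Str.len ln) →
    PySem.Str.join "" (lines.take ((sbCums lines t).countP (fun c => decide (c ≤ mx)))) = sbH mx lines t := by
  induction lines with
  | nil => intro t _; simp [sbCums, sbH, PySem.Str.join]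
  | cons ln rest ih =>
    intro t hpos
    have hrest : ∀ x ∈ rest, 1 ≤ PySem.Str.len x := fun x hx => hpos x (by simp [hx])
    by_cases hgt : t + PySem.Str.len ln > mx
    · have hz : (sbCums (ln :: rest) t).countP (fun c => decide (c ≤ mx)) = 0 := by
        rw [List.countP_eq_zero]
        intro c hc
        simp only [sbCums_cons, List.mem_cons] at hc
        simp only [decide_eq_true_eq]
        rcases hc with rfl | hc
        · omega
        · have := sbCums_gt rest (t + PySem.Str.len ln) hrest c hc
          omega
      rw [hz, List.take_zero, sbH_cons, if_pos hgt]
      rfl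
    · have hle : t + PySem.Str.len ln ≤ mx := by omega
      have hb : decide ((t + PySem.Str.len ln) ≤ mx) = true := decide_eq_true hle
      have hcount : (sbCums (ln :: rest) t).countP (fun c => decide (c ≤ mx)) =
          (sbCums rest (t + PySem.Str.len ln)).countP (fun c => decide (c ≤ mx)) + 1 := by
        rw [sbCums_cons, List.countP_cons, hb]
        simp
      rw [hcount, List.take_succ_cons, join_empty_cons, ih (t + PySem.Str.len ln) hrest,
        sbH_cons, if_neg hgt]

-- A's loop equals b followed by the stop-at-budget concatenation of the remaining lines
theorem sbLoopA_eq (mx : Int) (texts : List String) :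
    ∀ i b, sbLoopA mx texts i b = b ++ sbH mx (sbLines' texts i) (PySem.Str.len b) := by
  induction texts with
  | nil => intro i b; simp [sbLoopA, sbLines', sbH]
  | cons s rest ih =>
    intro i b
    show (if PySem.Str.len b + PySem.Str.len (sbFmt i s) > mx then b
          else sbLoopA mx rest (i + 1) (b ++ sbFmt i s)) =
        b ++ sbH mx (sbFmt i s :: sbLines' rest (i + 1)) (PySem.Str.len b)
    rw [sbH_cons]
    by_cases hgt : PySem.Str.len b + PySem.Str.len (sbFmt i s) > mx
    · rw [if_pos hgt, if_pos hgt]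
      simp
    · rw [if_neg hgt, if_neg hgt, ih (i + 1) (b ++ sbFmt i s), PySem.Str.len_append,
        String.append_assoc]

-- ===== VERDICT (by name: the statement is the Claim_ definition above) =====
theorem sb_py_spec : Claim_equal_sb_py := by
  intro texts mx _
  show PySem.Str.strip (sbLoopA mx texts 1 "") =
    PySem.Str.strip (PySem.Str.join ""
      ((sbLines texts).take ((sbCums (sbLines texts) 0).countP (fun c => decide (c ≤ mx)))))
  have hlines : sbLines texts = sbLines' texts 1 := (sbLines_eq texts 1).symm
  rw [hlines, joinTake_eq_sbH mx (sbLines' texts 1) 0 (sbLines'_len_pos texts 1),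
    sbLoopA_eq mx texts 1 ""]
  have h0 : PySem.Str.len "" = 0 := by decide
  rw [h0]
  simp
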